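-- pv_equiv track=rewrite | github.com/mattikantola/tira2_python | Viikko9/onediff.py | find
-- ===== SOURCE A (Python) =====
-- def find(t):
--
--     n = len(t)
--
--     longest = [1]*n
--
--     for iii in range(n):
--
--         for jjj in range(iii):
--
--             if abs(t[jjj]-t[iii]) <= 1 and longest[jjj] + 1 > longest[iii]:
--
--                 longest[iii] = longest[jjj] + 1
--
--     return max(longest)
-- ===== SOURCE B (Python) =====
-- def find(t):
--     best = {}
--     ans = 0
--     for x in t:
--         cur = max(best.get(x - 1, 0), best.get(x, 0), best.get(x + 1, 0)) + 1
--         best[x] = cur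
--         if cur > ans:
--             ans = cur
--     return ans
-- ===== Notes on version B (the rewrite author's own statement) =====
-- stated objective: faster
-- what changed: replaces the O(n^2) all-pairs DP over indices by a single pass keeping, in a dict, the best chain length ending at each value and combining best[x-1],best[x],best[x+1]
-- outside the precondition, e.g. on find([]): A raises ValueError, B returns 0
import Mathlib
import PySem

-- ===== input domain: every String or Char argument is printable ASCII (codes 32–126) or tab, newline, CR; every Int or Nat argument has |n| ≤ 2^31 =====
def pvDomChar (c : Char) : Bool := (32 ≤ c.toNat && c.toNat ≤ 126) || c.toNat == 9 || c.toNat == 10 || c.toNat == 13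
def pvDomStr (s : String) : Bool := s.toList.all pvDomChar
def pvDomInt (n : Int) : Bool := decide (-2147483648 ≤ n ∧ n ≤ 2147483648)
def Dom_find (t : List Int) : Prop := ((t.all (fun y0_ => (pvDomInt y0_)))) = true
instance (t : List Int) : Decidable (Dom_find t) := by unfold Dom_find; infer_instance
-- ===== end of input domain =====

-- B replaces A's all-pairs DP over index pairs by a single pass keeping per-value best chain lengths in a dict (measured faster).


-- ===== PORT A =====
def find (t : List Int) : Int :=
  let n : Int := PySem.List.len t
  let longest : List Int := PySem.List.pyRepeat [1] n
  let longest :=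
    (PySem.List.pyRange 0 n 1).foldl (fun longest iii =>
      (PySem.List.pyRange 0 iii 1).foldl (fun longest jjj =>
        if (PySem.List.pyGetD t jjj 0 - PySem.List.pyGetD t iii 0).natAbs ≤ 1 ∧
           PySem.List.pyGetD longest jjj 0 + 1 > PySem.List.pyGetD longest iii 0 then
          PySem.List.pySetD longest iii (PySem.List.pyGetD longest jjj 0 + 1)
        else longest) longest) longest
  (PySem.List.max? longest (fun y => y)).getD 0

-- ===== PORT B =====
-- one iteration of B's loop: update dict of per-value best lengths and the running answer
def findAltStep (st : PySem.Dict Int Int × Int) (x : Int) : PySem.Dict Int Int × Int :=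
  let cur := max (max (st.1.getD (x - 1) 0) (st.1.getD x 0)) (st.1.getD (x + 1) 0) + 1
  (st.1.insert x cur, if cur > st.2 then cur else st.2)

def find_alt (t : List Int) : Int :=
  (t.foldl findAltStep (PySem.Dict.empty, 0)).2

-- ===== PRECONDITION & SPEC =====
-- Pre_ excludes only the empty list: there Python's max([]) in A raises ValueError.
def Pre_find (t : List Int) : Prop := t ≠ []
instance (t : List Int) : Decidable (Pre_find t) := by unfold Pre_find; infer_instance
def pvWitness_find : List Int := [3, 4, 4, 2]

def Spec_find (t : List Int) (out : Int) : Prop := out = find_alt t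
instance (t : List Int) (out : Int) : Decidable (Spec_find t out) := by unfold Spec_find; infer_instance

-- ===== CLAIM (what is proved, stated in full; the proofs are below) =====
def Claim_equal_find : Prop := ∀ (t : List Int), Dom_find t → Pre_find t → Spec_find t (find t)

-- ===== LEMMAS AND PROOFS =====

-- the value A's inner loop computes for index k, reading earlier DP values from pre
def pvInner (t pre : List Int) (k : ℕ) : Int :=
  (List.range k).foldl (fun cur j =>
    if (t.getD j 0 - t.getD k 0).natAbs ≤ 1 ∧ pre.getD j 0 + 1 > cur then pre.getD j 0 + 1 else cur) 1

-- the first k entries of A's DP table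
def pvLens (t : List Int) : ℕ → List Int
  | 0 => []
  | k + 1 => pvLens t k ++ [pvInner t (pvLens t k) k]

-- final DP value at position j
def pvLv (t : List Int) (j : ℕ) : Int := (pvLens t t.length).getD j 0

-- best final DP value among the first k positions holding value v (0 if none)
def pvM (t : List Int) (v : Int) (k : ℕ) : Int :=
  (List.range k).foldl (fun m j => if t.getD j 0 = v then max m (pvLv t j) else m) 0

-- running best answer over the first k positions
def pvAns (t : List Int) (k : ℕ) : Int :=
  (List.range k).foldl (fun a j => max a (pvLv t j)) 0

-- A's outer loop body, after the PySem primitives are reduced to Nat indexing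
def outerBody (t : List Int) (longest : List Int) (i : ℕ) : List Int :=
  (List.range i).foldl (fun longest j =>
    if (t.getD j 0 - t.getD i 0).natAbs ≤ 1 ∧ longest.getD j 0 + 1 > longest.getD i 0 then
      longest.set i (longest.getD j 0 + 1) else longest) longest

theorem length_pvLens (t : List Int) (k : ℕ) : (pvLens t k).length = k := by
  induction k with
  | zero => rfl
  | succ k ih => simp [pvLens, ih]

theorem pvLens_take (t : List Int) {k m : ℕ} (h : k ≤ m) : (pvLens t m).take k = pvLens t k := by
  induction m with
  | zero => have hz : k = 0 := Nat.le_zero.mp h; subst hz; rfl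
  | succ m ih =>
    rcases Nat.lt_or_ge k (m+1) with hlt | hge
    · have hk : k ≤ m := by omega
      rw [pvLens, List.take_append_of_le_length (by rw [length_pvLens]; omega), ih hk]
    · have : k = m + 1 := by omega
      subst this
      exact List.take_of_length_le (by rw [length_pvLens])

theorem pvLens_getD (t : List Int) {k m j : ℕ} (hj : j < k) (hk : k ≤ m) :
    (pvLens t m).getD j 0 = (pvLens t k).getD j 0 := by
  rw [← pvLens_take t hk]
  rw [List.getD_eq_getElem?_getD, List.getD_eq_getElem?_getD, List.getElem?_take_of_lt hj]

theorem pvLv_eq_inner (t : List Int) {k : ℕ} (hk : k < t.length) :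
    pvLv t k = pvInner t (pvLens t k) k := by
  unfold pvLv
  rw [pvLens_getD t (Nat.lt_succ_self k) hk, pvLens]
  rw [List.getD_eq_getElem?_getD, List.getElem?_append_right (by rw [length_pvLens])]
  simp [length_pvLens]

theorem pvInner_ge_one (t pre : List Int) (k : ℕ) : 1 ≤ pvInner t pre k := by
  unfold pvInner
  have : ∀ (l : List ℕ) (c : Int), 1 ≤ c → 1 ≤ l.foldl (fun cur j =>
      if (t.getD j 0 - t.getD k 0).natAbs ≤ 1 ∧ pre.getD j 0 + 1 > cur then pre.getD j 0 + 1 else cur) c := by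
    intro l
    induction l with
    | nil => intro c hc; simpa using hc
    | cons j l ih =>
      intro c hc
      simp only [List.foldl_cons]
      split_ifs with h
      · exact ih _ (by omega)
      · exact ih _ hc
  exact this _ 1 le_rfl

theorem mem_pvLens_ge_one (t : List Int) (k : ℕ) : ∀ y ∈ pvLens t k, 1 ≤ y := by
  induction k with
  | zero => simp [pvLens]
  | succ k ih =>
    intro y hy
    rw [pvLens] at hy
    rcases List.mem_append.1 hy with h | h
    · exact ih y h
    · simp at h; subst h; exact pvInner_ge_one t _ k

theorem find_simp (t : List Int) : find t =
    (PySem.List.max? ((List.range t.length).foldl (outerBody t) (List.replicate t.length 1))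
      (fun y => y)).getD 0 := by
  unfold find outerBody
  simp only [PySem.List.len_eq, PySem.List.pyRepeat_singleton, Int.toNat_natCast,
    PySem.List.pyRange_zero_natCast, List.foldl_map, PySem.List.pyGetD_natCast,
    PySem.List.pySetD_natCast]

theorem set_getD_self (l : List Int) (i : ℕ) (h : i < l.length) : l.set i (l.getD i 0) = l := by
  apply List.ext_getElem
  · simp
  · intro m h1 h2
    simp only [List.getElem_set]
    split_ifs with hh
    · subst hh; simp [List.getD_eq_getElem?_getD, List.getElem?_eq_getElem h]
    · rfl

theorem inner_set (t : List Int) (k : ℕ) (L0 : List Int) (hk : k < L0.length) :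
    ∀ (l : List ℕ), (∀ j ∈ l, j < k) → ∀ cur : Int,
    l.foldl (fun L j => if (t.getD j 0 - t.getD k 0).natAbs ≤ 1 ∧ L.getD j 0 + 1 > L.getD k 0
        then L.set k (L.getD j 0 + 1) else L) (L0.set k cur)
    = L0.set k (l.foldl (fun cur j => if (t.getD j 0 - t.getD k 0).natAbs ≤ 1 ∧ L0.getD j 0 + 1 > cur
        then L0.getD j 0 + 1 else cur) cur) := by
  intro l
  induction l with
  | nil => intro _ cur; rfl
  | cons j l ih =>
    intro hl cur
    have hj : j < k := hl j (List.mem_cons_self)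
    have hgj : (L0.set k cur).getD j 0 = L0.getD j 0 := by
      rw [List.getD_eq_getElem?_getD, List.getD_eq_getElem?_getD,
        List.getElem?_set_ne (by omega)]
    have hgk : (L0.set k cur).getD k 0 = cur := by
      rw [List.getD_eq_getElem?_getD, List.getElem?_set_self hk]; rfl
    simp only [List.foldl_cons, hgj, hgk]
    split_ifs with h
    · rw [List.set_set]
      exact ih (fun x hx => hl x (List.mem_cons_of_mem _ hx)) _
    · exact ih (fun x hx => hl x (List.mem_cons_of_mem _ hx)) _

theorem outer_inv (t : List Int) : ∀ k, k ≤ t.length →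
    (List.range k).foldl (outerBody t) (List.replicate t.length 1)
    = pvLens t k ++ List.replicate (t.length - k) 1 := by
  intro k
  induction k with
  | zero => intro _; simp [pvLens]
  | succ k ih =>
    intro hk1
    have hk : k < t.length := by omega
    rw [List.range_succ, List.foldl_append, ih (by omega)]
    set L : List Int := pvLens t k ++ List.replicate (t.length - k) 1 with hL
    have hlen : L.length = t.length := by simp [hL, length_pvLens]; omega
    have hkL : k < L.length := by omega
    have hget : L.getD k 0 = 1 := by
      rw [List.getD_eq_getElem?_getD, hL, List.getElem?_append_right (by simp [length_pvLens])]
      simp only [length_pvLens, Nat.sub_self, List.getElem?_replicate]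
      rw [if_pos (by omega)]; rfl
    simp only [List.foldl_cons, List.foldl_nil]
    have h1 := inner_set t k L hkL (List.range k) (fun j hj => List.mem_range.mp hj) (L.getD k 0)
    rw [set_getD_self L k hkL] at h1
    show outerBody t L k = _
    unfold outerBody
    rw [h1, hget]
    have hreads : (List.range k).foldl (fun cur j =>
        if (t.getD j 0 - t.getD k 0).natAbs ≤ 1 ∧ L.getD j 0 + 1 > cur then L.getD j 0 + 1 else cur) 1
        = pvInner t (pvLens t k) k := by
      unfold pvInner
      apply PySem.List.foldl_congr_mem
      intro acc j hj
      have hjk : j < k := List.mem_range.mp hj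
      have hga : (pvLens t k ++ List.replicate (t.length - k) (1:Int)).getD j 0
          = (pvLens t k).getD j 0 := List.getD_append _ _ _ _ (by rw [length_pvLens]; omega)
      rw [hL, hga]
    rw [hreads]
    have hsplit : List.replicate (t.length - k) (1 : Int)
        = 1 :: List.replicate (t.length - (k+1)) 1 := by
      have h2 : t.length - k = (t.length - (k+1)) + 1 := by omega
      rw [h2, List.replicate_succ]
    rw [hL, hsplit, List.set_append_right _ _ (by rw [length_pvLens])]
    simp only [length_pvLens, Nat.sub_self, List.set_cons_zero]
    rw [pvLens]
    simp

theorem find_eq_lens (t : List Int) :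
    find t = (PySem.List.max? (pvLens t t.length) (fun y => y)).getD 0 := by
  rw [find_simp, outer_inv t t.length le_rfl]
  simp

theorem pvM_succ (t : List Int) (v : Int) (k : ℕ) :
    pvM t v (k + 1) = if t.getD k 0 = v then max (pvM t v k) (pvLv t k) else pvM t v k := by
  unfold pvM
  rw [List.range_succ, List.foldl_append]
  simp

theorem pvAns_succ (t : List Int) (k : ℕ) :
    pvAns t (k + 1) = max (pvAns t k) (pvLv t k) := by
  unfold pvAns
  rw [List.range_succ, List.foldl_append]
  simp

set_option maxHeartbeats 1000000 in
theorem cur_aux (t : List Int) (k : ℕ) : ∀ m : ℕ,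
    (List.range m).foldl (fun cur j =>
      if (t.getD j 0 - t.getD k 0).natAbs ≤ 1 ∧ pvLv t j + 1 > cur then pvLv t j + 1 else cur) 1
    = max (max (pvM t (t.getD k 0 - 1) m) (pvM t (t.getD k 0) m)) (pvM t (t.getD k 0 + 1) m) + 1 := by
  intro m
  induction m with
  | zero => simp [pvM]
  | succ m ih =>
    rw [List.range_succ, List.foldl_append, ih, pvM_succ, pvM_succ, pvM_succ]
    simp only [List.foldl_cons, List.foldl_nil]
    generalize pvM t (t.getD k 0 - 1) m = a
    generalize pvM t (t.getD k 0) m = b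
    generalize pvM t (t.getD k 0 + 1) m = c
    generalize hL : pvLv t m = L
    generalize hy : t.getD m 0 = y
    generalize hx : t.getD k 0 = xv
    simp only [max_def]
    split_ifs <;> omega

theorem cur_eq (t : List Int) {k : ℕ} (hk : k < t.length) :
    max (max (pvM t (t.getD k 0 - 1) k) (pvM t (t.getD k 0) k)) (pvM t (t.getD k 0 + 1) k) + 1
      = pvLv t k := by
  rw [pvLv_eq_inner t hk]
  have hcong : pvInner t (pvLens t k) k = (List.range k).foldl (fun cur j =>
      if (t.getD j 0 - t.getD k 0).natAbs ≤ 1 ∧ pvLv t j + 1 > cur then pvLv t j + 1 else cur) 1 := by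
    unfold pvInner
    apply PySem.List.foldl_congr_mem
    intro acc j hj
    have hjk : j < k := List.mem_range.mp hj
    rw [show (pvLens t k).getD j 0 = pvLv t j from (pvLens_getD t hjk hk.le).symm]
  rw [hcong]
  exact (cur_aux t k k).symm

theorem b_state (t : List Int) : ∀ k, k ≤ t.length →
    (∀ v, ((t.take k).foldl findAltStep (PySem.Dict.empty, 0)).1.getD v 0 = pvM t v k) ∧
    ((t.take k).foldl findAltStep (PySem.Dict.empty, 0)).2 = pvAns t k := by
  intro k
  induction k with
  | zero =>
    intro _
    constructor
    · intro v; simp [pvM, PySem.Dict.getD_empty]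
    · simp [pvAns]
  | succ k ih =>
    intro hk1
    have hk : k < t.length := by omega
    obtain ⟨ihd, iha⟩ := ih (by omega)
    have htake : t.take (k+1) = t.take k ++ [t.getD k 0] := by
      rw [List.take_add_one, List.getElem?_eq_getElem hk]
      simp [List.getD_eq_getElem?_getD, List.getElem?_eq_getElem hk]
    rw [htake, List.foldl_append]
    simp only [List.foldl_cons, List.foldl_nil, findAltStep]
    set x := t.getD k 0 with hx
    have hcur : max (max (pvM t (x - 1) k) (pvM t x k)) (pvM t (x + 1) k) + 1 = pvLv t k :=
      cur_eq t hk
    constructor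
    · intro v
      simp only [ihd, PySem.Dict.getD_insert, hcur, pvM_succ]
      by_cases hv : v = x
      · subst hv
        rw [if_pos rfl, if_pos rfl]
        have hle : pvM t x k ≤ pvLv t k := by
          rw [← hcur]
          have h1 : pvM t x k ≤ max (max (pvM t (x-1) k) (pvM t x k)) (pvM t (x+1) k) :=
            le_trans (le_max_right _ _) (le_max_left _ _)
          omega
        omega
      · rw [if_neg hv, if_neg (fun h => hv h.symm)]
    · simp only [ihd, iha, hcur, pvAns_succ]
      simp only [max_def]
      split_ifs <;> omega

theorem find_alt_eq_ans (t : List Int) : find_alt t = pvAns t t.length := by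
  have := (b_state t t.length le_rfl).2
  rw [List.take_of_length_le le_rfl] at this
  exact this

theorem foldl_range_getD (l : List Int) (c : Int) :
    (List.range l.length).foldl (fun a j => max a (l.getD j 0)) c = l.foldl max c := by
  induction l using List.reverseRecOn generalizing c with
  | nil => simp
  | append_singleton l y ih =>
    rw [List.length_append, List.length_singleton, List.range_succ, List.foldl_append,
        List.foldl_append]
    have hcong : (List.range l.length).foldl (fun a j => max a ((l ++ [y]).getD j 0)) c
        = (List.range l.length).foldl (fun a j => max a (l.getD j 0)) c := by
      apply PySem.List.foldl_congr_mem
      intro acc j hj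
      rw [List.mem_range] at hj
      rw [List.getD_append _ _ _ _ hj]
    rw [hcong, ih]
    simp

-- ===== VERDICT (by name: the statement is the Claim_ definition above) =====
theorem find_spec : Claim_equal_find := by
  intro t _ hpre
  unfold Spec_find
  rw [find_eq_lens, find_alt_eq_ans]
  have hn : 0 < t.length := List.length_pos_iff.mpr hpre
  rcases hcons : pvLens t t.length with _ | ⟨l0, rest⟩
  · exfalso
    have := length_pvLens t t.length
    rw [hcons] at this
    simp at this
    omega
  · rw [PySem.List.max?_id_cons, Option.getD_some]
    have hl0 : 1 ≤ l0 := mem_pvLens_ge_one t t.length l0 (by rw [hcons]; exact List.mem_cons_self)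
    have hAns : pvAns t t.length = (pvLens t t.length).foldl max 0 := by
      have h := foldl_range_getD (pvLens t t.length) 0
      rw [length_pvLens] at h
      unfold pvAns pvLv
      exact h
    rw [hAns, hcons]
    simp only [List.foldl_cons]
    rw [max_eq_right (by omega : (0:Int) ≤ l0)]
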